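-- pv_equiv track=rewrite | github.com/sergiu210106/Fundamental-Algorithms | assignment 1/exercise11.py | primepref
-- ===== SOURCE A (Python) =====
-- def prime(x : int):
--     '''
--     function for verifying if x is prime
--
--     :param x: int
--     :return: void
--     '''
--     if x < 2:
--         return 0
--     if x == 2:
--         return 1
--     if x % 2 == 0:
--         return 0
--     for i in range(3, int(x**0.5)+1, 2):
--         if x % i == 0:
--             return 0
--     return 1
--
-- def primepref(n : int):
--     '''
--     function for generating all numbers of n digits that have all their prefixes prime numbers
--
--     :param n: int
--     :return: list
--     '''
--
--     if n == 1:
--         return [2,3,5,7]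
--     else:
--         result = []
--         for num in primepref(n-1):
--             for digit in range(10):
--                 if prime(num * 10 + digit) == 1:
--                     result.append(num * 10 + digit)
--         return result
-- ===== SOURCE B (Python) =====
-- def prime(x : int):
--     if x < 2:
--         return 0
--     if x == 2:
--         return 1
--     if x % 2 == 0:
--         return 0
--     for i in range(3, int(x**0.5)+1, 2):
--         if x % i == 0:
--             return 0
--     return 1
--
-- def primepref(n : int):
--     result = [2, 3, 5, 7]
--     for _ in range(n - 1):
--         result = [p * 10 + d for p in result for d in range(10)
--                   if prime(p * 10 + d) == 1]
--     return result
-- ===== Notes on version B (the rewrite author's own statement) =====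
-- stated objective: simpler
-- what changed: Replaces the top-down recursion on n with an iterative bottom-up loop that starts from [2,3,5,7] and extends every prefix by one digit per level, using a list comprehension instead of nested append loops.
-- outside the precondition, e.g. on primepref(0): A raises RecursionError, B returns [2, 3, 5, 7]
import Mathlib
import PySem

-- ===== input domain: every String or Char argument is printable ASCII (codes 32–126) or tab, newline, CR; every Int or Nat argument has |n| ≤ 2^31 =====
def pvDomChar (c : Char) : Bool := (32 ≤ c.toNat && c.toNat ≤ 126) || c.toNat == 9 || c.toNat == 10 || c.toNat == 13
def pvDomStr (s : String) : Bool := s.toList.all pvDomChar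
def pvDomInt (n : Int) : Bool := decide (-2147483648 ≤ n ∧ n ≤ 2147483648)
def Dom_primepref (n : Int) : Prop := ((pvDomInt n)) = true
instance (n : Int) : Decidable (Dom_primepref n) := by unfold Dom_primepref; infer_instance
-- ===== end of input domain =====

-- B rewrites the top-down recursion as an iterative bottom-up digit-extension loop (same output, no recursion).

-- ===== PORT A =====
-- shared helper `prime` (identical in both Python sources).
-- int(x**0.5) is ported as Nat.sqrt x.toNat: exact for the magnitudes reached here
-- (float sqrt is correctly rounded, so int(x**0.5) = isqrt(x) for x < 2^52).
def pvPrime (x : Int) : Int :=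
  if x < 2 then 0
  else if x == 2 then 1
  else if PySem.Int.mod x 2 == 0 then 0
  else if (PySem.List.pyRange 3 ((Nat.sqrt x.toNat : Int) + 1) 2).any
            (fun i => PySem.Int.mod x i == 0) then 0
  else 1

-- A's recursion, on the fuel n.toNat (for n ≤ 0 the Python recursion never terminates; outside Pre_)
def primeprefAux : Nat → List Int
  | 0 => []
  | 1 => [2, 3, 5, 7]
  | Nat.succ (Nat.succ k) =>
      (primeprefAux (k + 1)).foldl
        (fun result num =>
          (PySem.List.pyRange 0 10 1).foldl
            (fun result digit =>
              if pvPrime (num * 10 + digit) == 1 then result ++ [num * 10 + digit]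
              else result)
            result)
        []

def primepref (n : Int) : List Int := primeprefAux n.toNat

-- ===== PORT B =====
-- one level of B's loop body: the list comprehension
def primeprefStep (res : List Int) : List Int :=
  res.flatMap (fun p =>
    ((PySem.List.pyRange 0 10 1).filter (fun d => pvPrime (p * 10 + d) == 1)).map
      (fun d => p * 10 + d))

def primepref_alt (n : Int) : List Int :=
  (PySem.List.pyRange 0 (n - 1) 1).foldl (fun res _ => primeprefStep res) [2, 3, 5, 7]

-- ===== PRECONDITION & SPEC =====
-- Pre_ excludes n ≤ 0, where the Python A recurses forever (RecursionError).
def Pre_primepref (n : Int) : Prop := 1 ≤ n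
instance (n : Int) : Decidable (Pre_primepref n) := by unfold Pre_primepref; infer_instance
def pvWitness_primepref : Int := (2)

def Spec_primepref (n : Int) (out : List Int) : Prop := out = primepref_alt n
instance (n : Int) (out : List Int) : Decidable (Spec_primepref n out) := by unfold Spec_primepref; infer_instance

-- ===== CLAIM (what is proved, stated in full; the proofs are below) =====
def Claim_equal_primepref : Prop := ∀ (n : Int), Dom_primepref n → Pre_primepref n → Spec_primepref n (primepref n)

-- ===== LEMMAS AND PROOFS =====

-- A's one level (nested append loops) computes B's comprehension.
theorem primeprefAux_succ_succ (k : Nat) :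
    primeprefAux (k + 2) = primeprefStep (primeprefAux (k + 1)) := by
  have hbody : ∀ (l : List Int) (acc : List Int),
      l.foldl
        (fun result num =>
          (PySem.List.pyRange 0 10 1).foldl
            (fun result digit =>
              if pvPrime (num * 10 + digit) == 1 then result ++ [num * 10 + digit]
              else result)
            result)
        acc
      = acc ++ l.flatMap (fun p =>
          ((PySem.List.pyRange 0 10 1).filter (fun d => pvPrime (p * 10 + d) == 1)).map
            (fun d => p * 10 + d)) := by
    intro l
    induction l with
    | nil => intro acc; simp
    | cons p t ih =>
        intro acc
        simp only [List.foldl_cons, List.flatMap_cons, ih,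
          PySem.List.foldl_append_if (fun d => pvPrime (p * 10 + d) == 1)
            (fun d => p * 10 + d), List.append_assoc]
  show (primeprefAux (k + 1)).foldl _ [] = _
  rw [hbody, List.nil_append, primeprefStep]

-- folding a step that ignores the elements is iteration
theorem foldl_const_step {α : Type} (l : List α) (init : List Int) :
    l.foldl (fun res _ => primeprefStep res) init = primeprefStep^[l.length] init := by
  induction l generalizing init with
  | nil => rfl
  | cons x t ih => simp [List.foldl_cons, ih, Function.iterate_succ_apply]

theorem primeprefAux_eq_iterate (k : Nat) :
    primeprefAux (k + 1) = primeprefStep^[k] [2, 3, 5, 7] := by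
  induction k with
  | zero => rfl
  | succ m ih =>
      rw [show m + 1 + 1 = m + 2 from rfl, primeprefAux_succ_succ, ih]
      exact (Function.iterate_succ_apply' _ _ _).symm

-- ===== VERDICT (by name: the statement is the Claim_ definition above) =====
theorem primepref_spec : Claim_equal_primepref := by
  intro n _ hpre
  unfold Pre_primepref at hpre
  unfold Spec_primepref primepref primepref_alt
  rw [foldl_const_step, PySem.List.length_pyRange_one]
  obtain ⟨k, hk⟩ : ∃ k : Nat, n.toNat = k + 1 :=
    ⟨n.toNat - 1, by omega⟩
  rw [hk, primeprefAux_eq_iterate]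
  congr 1
  omega
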